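-- pv_equiv track=rewrite | github.com/jhrcook/advent-of-code_2021 | advent_of_code/challenges/day12.py | remove_already_visited
-- ===== SOURCE A (Python) =====
-- Neighbors = set[str]
--
-- Path = list[str]
--
-- def remove_already_visited(neighbors: Neighbors, path: Path) -> Neighbors:
--     """Remove the 'small' caves from a set of neighbors that are already in the path.
--
--     This is the triming method for part 1 of the puzzle.
--
--     Args:
--         neighbors (Neighbors): A set of neighboring caves.
--         path (Path): Current path.
--
--     Returns:
--         Neighbors: Trimmed set of neighbors.
--     """
--     _neighbors = neighbors.copy()
--     for neighbor in neighbors: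
--         if neighbor.isupper():
--             continue
--         if neighbor in path:
--             _neighbors.remove(neighbor)
--     return _neighbors
-- ===== SOURCE B (Python) =====
-- def remove_already_visited(neighbors, path):
--     removable = {c for c in path if not c.isupper()}
--     return neighbors - removable
-- ===== Notes on version B (the rewrite author's own statement) =====
-- stated objective: faster
-- what changed: B builds the set of small caves occurring in the path once and returns a single set difference, instead of scanning the neighbor set and testing each neighbor for list membership in path.
import Mathlib
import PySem

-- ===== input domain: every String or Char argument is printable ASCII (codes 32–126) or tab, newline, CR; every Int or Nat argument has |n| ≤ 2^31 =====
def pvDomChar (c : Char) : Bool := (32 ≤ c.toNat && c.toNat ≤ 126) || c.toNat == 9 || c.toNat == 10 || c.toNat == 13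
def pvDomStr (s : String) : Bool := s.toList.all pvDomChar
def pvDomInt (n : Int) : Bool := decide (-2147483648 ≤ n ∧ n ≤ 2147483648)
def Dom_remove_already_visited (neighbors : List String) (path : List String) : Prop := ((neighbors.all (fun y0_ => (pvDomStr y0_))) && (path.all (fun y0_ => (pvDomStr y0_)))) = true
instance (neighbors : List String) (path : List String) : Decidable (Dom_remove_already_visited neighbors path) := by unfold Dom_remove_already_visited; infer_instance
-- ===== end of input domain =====

-- B replaces A's per-neighbor scan of `path` by one removable-set built from `path` and a single
-- set difference (idiomatic; asymptotically fewer membership scans). Return-value equivalence only.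

-- str.isupper(): at least one cased character and no lowercase one (exact on the ASCII domain,
-- where the cased characters are exactly the alphabetic ones).
def pyIsupper (s : String) : Bool :=
  s.toList.any PySem.Chars.isalpha && !(s.toList.any PySem.Chars.islower)

-- ===== PORT A =====
def remove_already_visited (neighbors : List String) (path : List String) : List String :=
  neighbors.foldl
    (fun acc neighbor =>
      if pyIsupper neighbor then acc
      else if path.contains neighbor then (PySem.Set.remove? acc neighbor).getD acc
      else acc)
    neighbors

-- ===== PORT B =====
def remove_already_visited_alt (neighbors : List String) (path : List String) : List String :=
  let removable : PySem.Set String := PySem.Set.ofList (path.filter (fun c => !pyIsupper c))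
  PySem.Set.diff neighbors removable

-- ===== PRECONDITION & SPEC =====
def Spec_remove_already_visited (neighbors : List String) (path : List String) (out : List String) : Prop := out = remove_already_visited_alt neighbors path
instance (neighbors : List String) (path : List String) (out : List String) : Decidable (Spec_remove_already_visited neighbors path out) := by unfold Spec_remove_already_visited; infer_instance

-- ===== CLAIM (what is proved, stated in full; the proofs are below) =====
def Claim_equal_remove_already_visited : Prop := ∀ (neighbors : List String) (path : List String), Dom_remove_already_visited neighbors path → Spec_remove_already_visited neighbors path (remove_already_visited neighbors path)

-- ===== LEMMAS AND PROOFS =====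

-- The keep-predicate both programs agree on.
def pvKeep (path : List String) (n : String) : Bool := pyIsupper n || !path.contains n

-- A's fold over `l`, from any accumulator whose non-kept elements all still occur in `l`,
-- filters the accumulator by the keep-predicate.
theorem pvFoldA (path : List String) (l : List String) (acc : List String)
    (h : ∀ x ∈ acc, pvKeep path x = true ∨ x ∈ l) :
    l.foldl
      (fun acc neighbor =>
        if pyIsupper neighbor then acc
        else if path.contains neighbor then (PySem.Set.remove? acc neighbor).getD acc
        else acc)
      acc = acc.filter (pvKeep path) := by
  induction l generalizing acc with
  | nil =>
    simp only [List.foldl_nil]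
    symm
    apply List.filter_eq_self.mpr
    intro x hx
    rcases h x hx with hk | hk
    · exact hk
    · cases hk
  | cons n t ih =>
    by_cases hk : pvKeep path n = true
    · have hstep : (if pyIsupper n then acc
          else if path.contains n then (PySem.Set.remove? acc n).getD acc
          else acc) = acc := by
        unfold pvKeep at hk
        by_cases hpu : pyIsupper n = true
        · rw [if_pos hpu]
        · rw [if_neg hpu]
          have hpc : path.contains n = false := by
            rcases Bool.or_eq_true .. |>.mp hk with h' | h'
            · exact absurd h' hpu
            · simpa using h'
          rw [if_neg (by rw [hpc]; simp)]
      rw [List.foldl_cons, hstep]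
      apply ih
      intro x hx
      rcases h x hx with h' | h'
      · exact Or.inl h'
      · rcases List.mem_cons.mp h' with h'' | h''
        · exact Or.inl (h'' ▸ hk)
        · exact Or.inr h''
    · have hk' : pvKeep path n = false := Bool.not_eq_true _ ▸ by simpa using hk
      unfold pvKeep at hk'
      have hu : pyIsupper n = false := by
        cases h' : pyIsupper n
        · rfl
        · rw [h'] at hk'; simp at hk'
      have hc : path.contains n = true := by
        cases h' : path.contains n
        · rw [hu, h'] at hk'; simp at hk'
        · rfl
      have hstep : (if pyIsupper n then acc
          else if path.contains n then (PySem.Set.remove? acc n).getD acc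
          else acc) = acc.filter (fun y => !(y == n)) := by
        rw [if_neg (by rw [hu]; simp), if_pos hc]
        by_cases hmem : n ∈ acc
        · rw [PySem.Set.remove?_of_mem hmem]
          rfl
        · have hcf : ¬ PySem.Set.contains acc n = true :=
            fun h' => hmem ((PySem.Set.contains_iff _ _).mp h')
          have hnone : PySem.Set.remove? acc n = none := by
            unfold PySem.Set.remove?
            rw [if_neg hcf]
          rw [hnone, Option.getD_none]
          symm
          apply List.filter_eq_self.mpr
          intro x hx
          have hne : x ≠ n := fun he => hmem (he ▸ hx)
          simp [hne]
      rw [List.foldl_cons, hstep]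
      have hsub : ∀ x ∈ acc.filter (fun y => !(y == n)), pvKeep path x = true ∨ x ∈ t := by
        intro x hx
        have hxa := List.mem_of_mem_filter hx
        have hxne : ¬ (x == n) = true := by
          have := List.of_mem_filter hx
          simpa using this
        rcases h x hxa with h' | h'
        · exact Or.inl h'
        · rcases List.mem_cons.mp h' with h'' | h''
          · exact absurd (by simp [h'']) hxne
          · exact Or.inr h''
      rw [ih _ hsub, List.filter_filter]
      apply List.filter_congr
      intro x hx
      by_cases he : x = n
      · subst he
        have : pvKeep path x = false := by unfold pvKeep; rw [hu, hc]; rfl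
        simp [this]
      · simp [he]

-- B's predicate equals the keep-predicate.
theorem pvPredB (path : List String) (n : String) :
    (!PySem.Set.contains (PySem.Set.ofList (path.filter (fun c => !pyIsupper c))) n)
      = pvKeep path n := by
  unfold pvKeep
  by_cases h : n ∈ PySem.Set.ofList (path.filter (fun c => !pyIsupper c))
  · have hc : PySem.Set.contains (PySem.Set.ofList (path.filter (fun c => !pyIsupper c))) n = true :=
      (PySem.Set.contains_iff _ _).mpr h
    have hm := (PySem.Set.mem_ofList _ _).mp h
    rw [List.mem_filter] at hm
    obtain ⟨hp, hu⟩ := hm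
    simp only [Bool.not_eq_true'] at hu
    simp [hu, hp]
  · have hc : PySem.Set.contains (PySem.Set.ofList (path.filter (fun c => !pyIsupper c))) n = false := by
      cases h' : PySem.Set.contains (PySem.Set.ofList (path.filter (fun c => !pyIsupper c))) n
      · rfl
      · exact absurd ((PySem.Set.contains_iff _ _).mp h') h
    have hm : ¬ (n ∈ path ∧ pyIsupper n = false) := by
      intro ⟨hp, hu⟩
      exact h ((PySem.Set.mem_ofList _ _).mpr (List.mem_filter.mpr ⟨hp, by simp [hu]⟩))
    by_cases hu : pyIsupper n = true
    · simp [hu]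
    · have hp : n ∉ path := fun hpn => hm ⟨hpn, Bool.not_eq_true _ ▸ by simpa using hu⟩
      simp [hu, hp]

-- ===== VERDICT (by name: the statement is the Claim_ definition above) =====
theorem remove_already_visited_spec : Claim_equal_remove_already_visited := by
  intro neighbors path _
  unfold Spec_remove_already_visited remove_already_visited remove_already_visited_alt
  rw [pvFoldA path neighbors neighbors (fun x hx => Or.inr hx)]
  unfold PySem.Set.diff
  exact List.filter_congr (fun x _ => (pvPredB path x).symm)
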